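-- pv_equiv track=rewrite | github.com/PAWCIOGAA/ASD | DYNAMIC_PROGRAMMING/Kolokwia/ostatnieKol.py | orchard
-- ===== SOURCE A (Python) =====
-- def orchard(T, m):
--     n = len(T)
--     INF = float('inf')
--
--     # Tworzymy tablicę DP o wymiarach (n+1) x m, wypełnioną nieskończonościami
--     dp = [[INF] * m for _ in range(n + 1)]
--
--     # Inicjalizacja: dla 0 drzew reszta 0 wymaga 0 wyciętych drzew
--     dp[0][0] = 0
--
--     # Iterujemy po każdym drzewie
--     for i in range(n):
--         for j in range(m):
--             if dp[i][j] != INF:  # Jeśli stan dp[i][j] jest osiągalny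
--                 # 1. Nie wycinamy drzewa - dodajemy jabłka z i-tego drzewa do sumy
--                 new_mod = (j + T[i]) % m
--                 dp[i + 1][new_mod] = min(dp[i + 1][new_mod], dp[i][j])
--
--                 # 2. Wycinamy drzewo - ignorujemy jabłka z i-tego drzewa, ale zwiększamy licznik wyciętych drzew
--                 dp[i + 1][j] = min(dp[i + 1][j], dp[i][j] + 1)
--
--     # Wynik znajduje się w dp[n][0] - minimalna liczba drzew do wycięcia, aby suma była podzielna przez m
--     return dp[n][0] if dp[n][
--                            0] != INF else n  # Jeśli nie znaleziono rozwiązania, zwracamy n (maksymalna liczba drzew do wycięcia)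
-- ===== SOURCE B (Python) =====
-- def _conv(x, y, m):
--     # min-plus convolution over residues mod m, iterating only reachable entries
--     sx = [j for j in range(m) if x[j] is not None]
--     sy = [k for k in range(m) if y[k] is not None]
--     out = [None] * m
--     for j in sx:
--         for k in sy:
--             t = (j + k) % m
--             c = x[j] + y[k]
--             if out[t] is None or c < out[t]:
--                 out[t] = c
--     return out
--
--
-- def _group(r, c, m):
--     # vector for the c trees of residue r: cutting j of them keeps residue (c-j)*r;
--     # the optimum never cuts more than m-1 trees of one residue (j and j minus the
--     # additive order of r keep the same residue), so j is capped at min(c, m-1)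
--     g = [None] * m
--     for j in range(min(c, m - 1) + 1):
--         t = ((c - j) * r) % m
--         if g[t] is None:  # j is increasing: the first write is the minimum
--             g[t] = j
--     return g
--
--
-- def orchard(T, m):
--     # Group the trees by residue mod m, summarise each group as a per-kept-residue
--     # min-cut vector, and combine the groups by min-plus convolution.
--     if not T:
--         return 0
--     counts = {}
--     for a in T:
--         r = a % m
--         counts[r] = counts.get(r, 0) + 1
--     best = [None] * m
--     best[0] = 0
--     for r, c in counts.items():
--         best = _conv(best, _group(r, c, m), m)
--     return best[0]  # always an int: cutting every tree keeps residue 0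
-- ===== Notes on version B (the rewrite author's own statement) =====
-- stated objective: faster
-- what changed: Replaces A's row-by-row (n+1) x m table DP over individual trees by grouping trees by residue mod m, building one per-kept-residue min-cut vector per group (cut counts capped at m-1 by a period argument), and combining groups by support-sparse min-plus convolution.
import Mathlib
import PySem

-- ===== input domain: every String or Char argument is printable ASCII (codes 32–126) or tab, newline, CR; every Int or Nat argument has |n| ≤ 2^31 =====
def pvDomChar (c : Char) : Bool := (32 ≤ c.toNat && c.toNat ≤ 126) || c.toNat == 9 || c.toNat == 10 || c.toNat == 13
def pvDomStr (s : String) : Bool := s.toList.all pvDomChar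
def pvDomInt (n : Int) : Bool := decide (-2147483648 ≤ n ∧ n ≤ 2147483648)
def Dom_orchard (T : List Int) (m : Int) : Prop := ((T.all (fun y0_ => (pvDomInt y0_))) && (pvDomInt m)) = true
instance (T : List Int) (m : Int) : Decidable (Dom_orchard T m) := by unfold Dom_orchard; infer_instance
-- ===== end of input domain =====

-- B replaces A's row-by-row (n+1)×m table DP over the trees by grouping the trees by
-- residue mod m, summarising each group as a per-kept-residue min-cut vector (cut counts
-- capped at m-1 by a period argument), and combining groups by support-sparse min-plus
-- convolution; objective: faster when residues repeat (claim checked by the timing run).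

-- ===== PORT A =====
-- float('inf') is modelled as `none` (all finite dp values are Ints); min with ∞:
def pvOmin : Option Int → Option Int → Option Int
  | none, y => y
  | some a, none => some a
  | some a, some b => some (min a b)

-- body of A's inner `for j in range(m)` loop (the `if dp[i][j] != INF` guard and the two pushes);
-- Python rows are arrays, so rows are ported as `Array (Option Int)`
def orchardUpd (row : Array (Option Int)) (a m : Int) (next : Array (Option Int)) (j : Nat) :
    Array (Option Int) :=
  match row.getD j none with
  | none => next
  | some v =>
    let newMod := (PySem.Int.mod ((j : Int) + a) m).toNat
    let next := next.setIfInBounds newMod (pvOmin (next.getD newMod none) (some v))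
    next.setIfInBounds j (pvOmin (next.getD j none) (some (v + 1)))

-- one iteration of A's outer loop: builds row dp[i+1] (initially all INF) from dp[i]
def orchardStep (m : Int) (row : Array (Option Int)) (a : Int) : Array (Option Int) :=
  (List.range m.toNat).foldl (orchardUpd row a m) (Array.replicate m.toNat none)

def orchard (T : List Int) (m : Int) : Int :=
  let n := T.length
  let row0 := (Array.replicate m.toNat (none : Option Int)).setIfInBounds 0 (some 0)
  let fin := T.foldl (orchardStep m) row0
  match fin.getD 0 none with
  | some v => v
  | none => (n : Int)

-- ===== PORT B =====
-- min-plus convolution, iterating only the reachable entries; the inner relaxation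
-- `if out[t] is None or c < out[t]: out[t] = c`
def pvConvUpd (x y : Array (Option Int)) (m : Int) (out : Array (Option Int)) (j k : Nat) :
    Array (Option Int) :=
  let t := (PySem.Int.mod ((j : Int) + (k : Int)) m).toNat
  match x.getD j none, y.getD k none with
  | some xv, some yv => out.setIfInBounds t (pvOmin (out.getD t none) (some (xv + yv)))
  | _, _ => out   -- unreachable: j and k range over the supports

def pvConv (x y : Array (Option Int)) (m : Int) : Array (Option Int) :=
  let sx := (List.range m.toNat).filter (fun j => !(x.getD j none == none))
  let sy := (List.range m.toNat).filter (fun k => !(y.getD k none == none))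
  sx.foldl (fun out j => sy.foldl (fun out k => pvConvUpd x y m out j k) out)
    (Array.replicate m.toNat none)

-- vector of one residue group: cutting j of the c trees of residue r keeps residue
-- (c-j)*r; j ascends, so Python's write-if-None keeps the first (= minimal) j
def pvGroup (r c m : Int) : Array (Option Int) :=
  (List.range ((min c (m - 1)) + 1).toNat).foldl
    (fun g (j : ℕ) =>
      let t := (PySem.Int.mod ((c - ((j : ℕ) : Int)) * r) m).toNat
      if g.getD t none = none then g.setIfInBounds t (some ((j : ℕ) : Int)) else g)
    (Array.replicate m.toNat none)

def orchard_alt (T : List Int) (m : Int) : Int :=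
  if T.isEmpty then 0
  else
    let counts := T.foldl (fun d a => d.modify (PySem.Int.mod a m) 0 (· + 1))
      (PySem.Dict.empty : PySem.Dict Int Int)
    let best0 := (Array.replicate m.toNat (none : Option Int)).setIfInBounds 0 (some 0)
    let fin := counts.items.foldl (fun best rc => pvConv best (pvGroup rc.1 rc.2 m) m) best0
    (fin.getD 0 none).getD 0   -- Python returns best[0], an int: cell 0 is never None

-- ===== PRECONDITION & SPEC =====
-- Pre excludes m ≤ 0, where A raises IndexError (dp[0] is the empty row).
def Pre_orchard (T : List Int) (m : Int) : Prop := 1 ≤ m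
instance (T : List Int) (m : Int) : Decidable (Pre_orchard T m) := by
  unfold Pre_orchard; infer_instance
def pvWitness_orchard : List Int × Int := ([3, 1, 2], 3)

def Spec_orchard (T : List Int) (m : Int) (out : Int) : Prop := out = orchard_alt T m
instance (T : List Int) (m : Int) (out : Int) : Decidable (Spec_orchard T m out) := by
  unfold Spec_orchard; infer_instance

-- ===== CLAIM (what is proved, stated in full; the proofs are below) =====
def Claim_equal_orchard : Prop :=
  ∀ (T : List Int) (m : Int), Dom_orchard T m → Pre_orchard T m → Spec_orchard T m (orchard T m)

-- ===== LEMMAS AND PROOFS =====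

-- ---------- A-side: closed form of one step of A's table DP ----------

theorem pvOmin_none_right (x : Option Int) : pvOmin x none = x := by
  cases x <;> rfl

theorem pvOmin_none_left (x : Option Int) : pvOmin none x = x := rfl

theorem pvOmin_assoc (x y z : Option Int) :
    pvOmin (pvOmin x y) z = pvOmin x (pvOmin y z) := by
  cases x <;> cases y <;> cases z <;> simp [pvOmin, min_assoc]

theorem pvOmin_idem (x : Option Int) : pvOmin x x = x := by
  cases x <;> simp [pvOmin]

-- hoist the accumulator out of a pvOmin-fold
theorem foldl_pvOmin_hoist {α : Type} (c : α → Option Int) (js : List α) (acc : Option Int) :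
    js.foldl (fun s j => pvOmin s (c j)) acc
      = pvOmin acc (js.foldl (fun s j => pvOmin s (c j)) none) := by
  induction js generalizing acc with
  | nil => simp [List.foldl, pvOmin_none_right]
  | cons j js ih =>
    simp only [List.foldl]
    rw [ih (pvOmin acc (c j)), ih (pvOmin none (c j)), pvOmin_none_left, pvOmin_assoc]

-- a pvOmin-fold of a pointwise pvOmin splits
theorem foldl_pvOmin_split (d1 d2 : Nat → Option Int) (js : List Nat) :
    js.foldl (fun s j => pvOmin s (pvOmin (d1 j) (d2 j))) none
      = pvOmin (js.foldl (fun s j => pvOmin s (d1 j)) none)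
               (js.foldl (fun s j => pvOmin s (d2 j)) none) := by
  induction js with
  | nil => simp [List.foldl, pvOmin]
  | cons j js ih =>
    simp only [List.foldl]
    rw [foldl_pvOmin_hoist _ js, foldl_pvOmin_hoist d1 js, foldl_pvOmin_hoist d2 js, ih]
    cases h1 : d1 j <;> cases h2 : d2 j <;>
      cases ha : js.foldl (fun s j => pvOmin s (d1 j)) none <;>
      cases hb : js.foldl (fun s j => pvOmin s (d2 j)) none <;>
      simp [pvOmin] <;> omega

-- a pvOmin-fold of a one-point indicator
theorem foldl_pvOmin_indicator (p : Nat) (x : Option Int) (js : List Nat) :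
    js.foldl (fun s j => pvOmin s (if j = p then x else none)) none
      = if p ∈ js then x else none := by
  induction js with
  | nil => simp [List.foldl]
  | cons j js ih =>
    simp only [List.foldl]
    rw [foldl_pvOmin_hoist _ js, ih, pvOmin_none_left]
    by_cases hj : j = p
    · subst hj
      by_cases hp : j ∈ js <;> simp [hp, pvOmin_none_right, pvOmin_idem]
    · have hpj : ¬ (p = j) := fun h => hj h.symm
      simp [hj, hpj, pvOmin_none_left, List.mem_cons]

-- Array.getD via getElem?
theorem pvAGetD {α : Type} (l : Array α) (i : Nat) (d : α) : l.getD i d = l[i]?.getD d := by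
  by_cases h : i < l.size <;> simp [Array.getD, h]

-- getD after setIfInBounds, within bounds
theorem pvGetD_set (l : Array (Option Int)) (i t : Nat) (v : Option Int) (ht : t < l.size) :
    (l.setIfInBounds i v).getD t none = if i = t then v else l.getD t none := by
  rw [pvAGetD, pvAGetD]
  by_cases h : i = t
  · subst h; simp [Array.getElem?_setIfInBounds, ht]
  · simp [Array.getElem?_setIfInBounds, h]

-- one update of A's inner loop, cell by cell
theorem orchardUpd_getD (row : Array (Option Int)) (a m : Int) (next : Array (Option Int))
    (j t : Nat) (ht : t < next.size) :
    (orchardUpd row a m next j).getD t none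
      = pvOmin (next.getD t none)
          (pvOmin (if (PySem.Int.mod ((j : Int) + a) m).toNat = t then row.getD j none else none)
                  (if j = t then (row.getD j none).map (· + 1) else none)) := by
  cases hv : row.getD j none with
  | none =>
    simp only [orchardUpd, hv, ite_self, Option.map_none, pvOmin_none_right]
  | some v =>
    simp only [orchardUpd, hv, Option.map_some]
    set c1 := (PySem.Int.mod ((j : Int) + a) m).toNat with hc1
    set n1 := next.setIfInBounds c1 (pvOmin (next.getD c1 none) (some v)) with hn1
    have hlen1 : n1.size = next.size := by rw [hn1]; simp
    rw [pvGetD_set n1 j t _ (by omega)]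
    by_cases h2 : j = t
    · rw [if_pos h2, if_pos h2]
      subst h2
      rw [hn1, pvGetD_set next c1 j _ ht]
      by_cases h1 : c1 = j
      · rw [if_pos h1, if_pos (h1 ▸ rfl), h1, pvOmin_assoc]
      · rw [if_neg h1, if_neg h1, pvOmin_none_left]
    · rw [if_neg h2, if_neg h2, hn1, pvGetD_set next c1 t _ ht]
      by_cases h1 : c1 = t
      · rw [if_pos h1, if_pos h1, pvOmin_none_right, h1]
      · rw [if_neg h1, if_neg h1, pvOmin_none_left, pvOmin_none_right]

theorem orchardUpd_size (row : Array (Option Int)) (a m : Int) (next : Array (Option Int))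
    (j : Nat) : (orchardUpd row a m next j).size = next.size := by
  cases hv : row.getD j none <;> simp only [orchardUpd, hv] <;> simp

theorem foldl_orchardUpd_getD (row : Array (Option Int)) (a m : Int) (js : List Nat)
    (next : Array (Option Int)) (t : Nat) (ht : t < next.size) :
    (js.foldl (orchardUpd row a m) next).getD t none
      = pvOmin (next.getD t none)
          (js.foldl (fun s (j : Nat) => pvOmin s
            (pvOmin (if (PySem.Int.mod ((j : Int) + a) m).toNat = t then row.getD j none else none)
                    (if j = t then (row.getD j none).map (· + 1) else none))) none) := by
  induction js generalizing next with
  | nil => simp [List.foldl, pvOmin_none_right]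
  | cons j js ih =>
    simp only [List.foldl]
    rw [ih _ (by rw [orchardUpd_size]; exact ht), orchardUpd_getD row a m next j t ht]
    conv_rhs => rw [foldl_pvOmin_hoist]
    rw [pvOmin_none_left, pvOmin_assoc]

-- arithmetic: the unique source index pushing into cell t
theorem push_source_iff (m : Int) (hm : 1 ≤ m) (a : Int) (j t : Nat)
    (hj : j < m.toNat) (ht : t < m.toNat) :
    (PySem.Int.mod ((j : Int) + a) m).toNat = t ↔ j = (((t : Int) - a) % m).toNat := by
  have hm0 : (0 : Int) < m := by omega
  rw [PySem.Int.mod_eq_emod_of_pos hm0]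
  have h1 : 0 ≤ ((j : Int) + a) % m := Int.emod_nonneg _ (by omega)
  have h2 : ((j : Int) + a) % m < m := Int.emod_lt_of_pos _ hm0
  have h3 : 0 ≤ ((t : Int) - a) % m := Int.emod_nonneg _ (by omega)
  have h4 : ((t : Int) - a) % m < m := Int.emod_lt_of_pos _ hm0
  constructor
  · intro h
    have h' : ((j : Int) + a) % m = (t : Int) := by omega
    have : ((t : Int) - a) % m = (j : Int) := by
      rw [← h', Int.sub_emod, Int.emod_emod_of_dvd _ (dvd_refl m), ← Int.sub_emod,
        add_sub_cancel_right]
      exact Int.emod_eq_of_lt (by omega) (by omega)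
    omega
  · intro h
    have hje : (j : Int) = ((t : Int) - a) % m := by omega
    have : ((j : Int) + a) % m = (t : Int) := by
      rw [hje, Int.add_emod, Int.emod_emod_of_dvd _ (dvd_refl m), ← Int.add_emod,
        sub_add_cancel]
      exact Int.emod_eq_of_lt (by omega) (by omega)
    omega

-- A's step in closed "pull" form
theorem orchardStep_getD (m : Int) (hm : 1 ≤ m) (row : Array (Option Int)) (a : Int)
    (t : Nat) (ht : t < m.toNat) :
    (orchardStep m row a).getD t none
      = pvOmin (row.getD (((t : Int) - a) % m).toNat none)
               ((row.getD t none).map (· + 1)) := by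
  rw [orchardStep, foldl_orchardUpd_getD _ _ _ _ _ t (by simpa using ht)]
  have hrep : (Array.replicate m.toNat (none : Option Int)).getD t none = none := by
    rw [pvAGetD]
    simp [ht]
  rw [hrep, pvOmin_none_left]
  have hcongr : (List.range m.toNat).foldl (fun s (j : Nat) => pvOmin s
      (pvOmin (if (PySem.Int.mod ((j : Int) + a) m).toNat = t then row.getD j none else none)
              (if j = t then (row.getD j none).map (· + 1) else none))) none
    = (List.range m.toNat).foldl (fun s (j : Nat) => pvOmin s
      (pvOmin (if j = (((t : Int) - a) % m).toNat
                 then row.getD (((t : Int) - a) % m).toNat none else none)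
              (if j = t then (row.getD t none).map (· + 1) else none))) none := by
    apply PySem.List.foldl_congr_mem
    intro s j hj
    rw [List.mem_range] at hj
    have hfst : (if (PySem.Int.mod ((j : Int) + a) m).toNat = t then row.getD j none else none)
        = (if j = (((t : Int) - a) % m).toNat
             then row.getD (((t : Int) - a) % m).toNat none else none) := by
      by_cases h : (PySem.Int.mod ((j : Int) + a) m).toNat = t
      · have hj0 : j = (((t : Int) - a) % m).toNat := (push_source_iff m hm a j t hj ht).mp h
        rw [if_pos h, if_pos hj0, hj0]
      · rw [if_neg h, if_neg (fun hc => h ((push_source_iff m hm a j t hj ht).mpr hc))]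
    rw [hfst]
    by_cases h : j = t
    · subst h; simp
    · simp [h]
  rw [hcongr, foldl_pvOmin_split, foldl_pvOmin_indicator, foldl_pvOmin_indicator]
  have hj0 : (((t : Int) - a) % m).toNat ∈ List.range m.toNat := by
    rw [List.mem_range]
    have h1 : 0 ≤ ((t : Int) - a) % m := Int.emod_nonneg _ (by omega)
    have h2 : ((t : Int) - a) % m < m := Int.emod_lt_of_pos _ (by omega)
    omega
  rw [if_pos hj0, if_pos (List.mem_range.mpr ht)]

-- ---------- the algebra: WithTop Int values, ZMod m residues, min-plus convolution ----------

-- abstraction of an optional finite cost (none = unreachable = ⊤)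
def pvF : Option Int → WithTop Int
  | none => ⊤
  | some v => (v : WithTop Int)

def pvOAdd : Option Int → Option Int → Option Int
  | some a, some b => some (a + b)
  | _, _ => none

theorem pvF_inj {a b : Option Int} (h : pvF a = pvF b) : a = b := by
  cases a <;> cases b <;> simp_all [pvF]

theorem pvF_min (a b : Option Int) : pvF (pvOmin a b) = min (pvF a) (pvF b) := by
  cases a <;> cases b <;> simp [pvF, pvOmin, pvOmin_none_right]

theorem pvF_add (a b : Option Int) : pvF (pvOAdd a b) = pvF a + pvF b := by
  cases a <;> cases b <;> simp [pvF, pvOAdd]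

theorem pvF_map_succ (o : Option Int) : pvF (o.map (· + 1)) = pvF o + 1 := by
  cases o <;> simp [pvF]

theorem pvMin_add_right (a b c : WithTop Int) : min a b + c = min (a + c) (b + c) := by
  induction a using WithTop.recTopCoe <;> induction b using WithTop.recTopCoe <;>
    induction c using WithTop.recTopCoe <;>
    first
      | simp
      | exact_mod_cast (min_add_add_right (α := Int) _ _ _).symm

theorem pvMin_add_left (a b c : WithTop Int) : a + min b c = min (a + b) (a + c) := by
  induction a using WithTop.recTopCoe <;> induction b using WithTop.recTopCoe <;>
    induction c using WithTop.recTopCoe <;>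
    first
      | simp
      | exact_mod_cast (min_add_add_left (α := Int) _ _ _).symm

theorem pvInf_min (a b : WithTop Int) : a ⊓ b = min a b := rfl

theorem pvInf_add_right {ι : Type} (s : Finset ι) (f : ι → WithTop Int) (c : WithTop Int) :
    s.inf f + c = s.inf (fun i => f i + c) := by
  induction s using Finset.cons_induction with
  | empty => simp
  | cons a s ha ih => simp [Finset.inf_cons, ← ih, pvInf_min, pvMin_add_right]

theorem pvInf_add_left {ι : Type} (s : Finset ι) (f : ι → WithTop Int) (c : WithTop Int) :
    c + s.inf f = s.inf (fun i => c + f i) := by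
  induction s using Finset.cons_induction with
  | empty => simp
  | cons a s ha ih => simp [Finset.inf_cons, ← ih, pvInf_min, pvMin_add_left]

theorem pvInf_comm {ι κ : Type} (s : Finset ι) (t : Finset κ) (f : ι → κ → WithTop Int) :
    s.inf (fun i => t.inf (f i)) = t.inf (fun j => s.inf (fun i => f i j)) := by
  apply le_antisymm
  · apply Finset.le_inf; intro j hj
    apply Finset.le_inf; intro i hi
    exact le_trans (Finset.inf_le hi) (Finset.inf_le hj)
  · apply Finset.le_inf; intro i hi
    apply Finset.le_inf; intro j hj
    exact le_trans (Finset.inf_le hj) (Finset.inf_le hi)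

theorem pvInf_equiv {α : Type} [Fintype α] [DecidableEq α] (e : Equiv.Perm α)
    (f : α → WithTop Int) :
    Finset.univ.inf (fun i => f (e i)) = Finset.univ.inf f := by
  apply le_antisymm
  · apply Finset.le_inf; intro b _
    calc Finset.univ.inf (fun i => f (e i)) ≤ f (e (e.symm b)) :=
          Finset.inf_le (Finset.mem_univ _)
      _ = f b := by rw [Equiv.apply_symm_apply]
  · apply Finset.le_inf; intro b _
    exact Finset.inf_le (Finset.mem_univ _)

theorem pvInf_range_val (M : ℕ) [NeZero M] (h : ℕ → WithTop Int) :
    (Finset.univ : Finset (ZMod M)).inf (fun j => h j.val) = (Finset.range M).inf h := by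
  apply le_antisymm
  · apply Finset.le_inf; intro b hb
    rw [Finset.mem_range] at hb
    calc (Finset.univ : Finset (ZMod M)).inf (fun j => h j.val)
        ≤ h ((b : ZMod M)).val := Finset.inf_le (Finset.mem_univ _)
      _ = h b := by rw [ZMod.val_cast_of_lt hb]
  · apply Finset.le_inf; intro j _
    exact Finset.inf_le (Finset.mem_range.mpr (ZMod.val_lt j))

-- residue-indexed cost vectors and their min-plus convolution
def pvE (M : ℕ) [NeZero M] : ZMod M → WithTop Int := fun t => if t = 0 then 0 else ⊤

def pvS (M : ℕ) [NeZero M] (a : Int) : ZMod M → WithTop Int :=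
  fun t => if t = (a : ZMod M) then 0 else if t = 0 then 1 else ⊤

def pvC (M : ℕ) [NeZero M] (x y : ZMod M → WithTop Int) : ZMod M → WithTop Int :=
  fun t => Finset.univ.inf fun j => x j + y (t - j)

def pvW (M : ℕ) [NeZero M] (T : List Int) : ZMod M → WithTop Int :=
  T.foldl (fun acc a => pvC M acc (pvS M a)) (pvE M)

-- inf of "x plus a vector supported on the two points c and 0"
theorem pvInf_two_point (M : ℕ) [NeZero M] (x : ZMod M → WithTop Int) (t c : ZMod M)
    (u v : WithTop Int) (huv : u ≤ v) :
    (Finset.univ.inf fun j => x j + (if t - j = c then u else if t - j = 0 then v else ⊤))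
      = min (x (t - c) + u) (x t + v) := by
  apply le_antisymm
  · apply le_min
    · calc Finset.univ.inf (fun j => x j + (if t - j = c then u else if t - j = 0 then v else ⊤))
          ≤ x (t - c) + (if t - (t - c) = c then u else if t - (t - c) = 0 then v else ⊤) :=
            Finset.inf_le (Finset.mem_univ _)
        _ = x (t - c) + u := by rw [sub_sub_cancel, if_pos rfl]
    · calc Finset.univ.inf (fun j => x j + (if t - j = c then u else if t - j = 0 then v else ⊤))
          ≤ x t + (if t - t = c then u else if t - t = 0 then v else ⊤) :=
            Finset.inf_le (Finset.mem_univ _)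
        _ ≤ x t + v := by
            rw [sub_self]
            by_cases h0 : (0 : ZMod M) = c
            · rw [if_pos h0]; exact add_le_add le_rfl huv
            · rw [if_neg h0, if_pos rfl]
  · apply Finset.le_inf
    intro j _
    by_cases h1 : t - j = c
    · have hj : j = t - c := by rw [← h1]; ring
      rw [if_pos h1, hj]
      exact min_le_left _ _
    · rw [if_neg h1]
      by_cases h2 : t - j = 0
      · have hj : j = t := by rw [sub_eq_zero] at h2; exact h2.symm
        rw [if_pos h2, hj]
        exact min_le_right _ _
      · rw [if_neg h2, add_top]
        exact le_top

theorem pvC_e_left (M : ℕ) [NeZero M] (x : ZMod M → WithTop Int) : pvC M (pvE M) x = x := by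
  funext t
  apply le_antisymm
  · calc (pvC M (pvE M) x) t ≤ pvE M 0 + x (t - 0) := Finset.inf_le (Finset.mem_univ _)
      _ = x t := by simp [pvE]
  · apply Finset.le_inf
    intro j _
    by_cases hj : j = 0
    · subst hj; simp [pvE]
    · simp [pvE, hj, top_add]

theorem pvC_e_right (M : ℕ) [NeZero M] (x : ZMod M → WithTop Int) : pvC M x (pvE M) = x := by
  funext t
  apply le_antisymm
  · calc (pvC M x (pvE M)) t ≤ x t + pvE M (t - t) := Finset.inf_le (Finset.mem_univ _)
      _ = x t := by simp [pvE]
  · apply Finset.le_inf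
    intro j _
    by_cases hj : t - j = 0
    · have : j = t := by rw [sub_eq_zero] at hj; exact hj.symm
      subst this; simp [pvE, hj]
    · simp [pvE, hj, add_top]

theorem pvC_assoc (M : ℕ) [NeZero M] (x y z : ZMod M → WithTop Int) :
    pvC M (pvC M x y) z = pvC M x (pvC M y z) := by
  funext t
  show (Finset.univ.inf fun j => (Finset.univ.inf fun k => x k + y (j - k)) + z (t - j))
     = Finset.univ.inf fun k => x k + (Finset.univ.inf fun i => y i + z (t - k - i))
  calc (Finset.univ.inf fun j => (Finset.univ.inf fun k => x k + y (j - k)) + z (t - j))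
      = Finset.univ.inf fun j => Finset.univ.inf fun k => (x k + y (j - k)) + z (t - j) := by
        apply Finset.inf_congr rfl
        intro j _
        exact pvInf_add_right _ _ _
    _ = Finset.univ.inf fun k => Finset.univ.inf fun j => (x k + y (j - k)) + z (t - j) :=
        pvInf_comm _ _ _
    _ = Finset.univ.inf fun k => Finset.univ.inf fun i => (x k + y i) + z (t - k - i) := by
        apply Finset.inf_congr rfl
        intro k _
        calc (Finset.univ.inf fun j => (x k + y (j - k)) + z (t - j))
            = Finset.univ.inf fun i => (x k + y ((Equiv.addLeft k) i - k)) + z (t - (Equiv.addLeft k) i) :=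
              (pvInf_equiv (Equiv.addLeft k) _).symm
          _ = Finset.univ.inf fun i => (x k + y i) + z (t - k - i) := by
              apply Finset.inf_congr rfl
              intro i _
              have h1 : (Equiv.addLeft k) i - k = i := by
                rw [Equiv.coe_addLeft, add_sub_cancel_left]
              have h2 : t - (Equiv.addLeft k) i = t - k - i := by
                rw [Equiv.coe_addLeft, sub_add_eq_sub_sub]
              rw [h1, h2]
    _ = Finset.univ.inf fun k => x k + (Finset.univ.inf fun i => y i + z (t - k - i)) := by
        apply Finset.inf_congr rfl
        intro k _
        rw [pvInf_add_left]
        apply Finset.inf_congr rfl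
        intro i _
        rw [add_assoc]

theorem pvFold_from (M : ℕ) [NeZero M] (l : List Int) (acc : ZMod M → WithTop Int) :
    l.foldl (fun acc a => pvC M acc (pvS M a)) acc = pvC M acc (pvW M l) := by
  induction l generalizing acc with
  | nil => simp [pvW, List.foldl, pvC_e_right]
  | cons a l ih =>
    show List.foldl _ (pvC M acc (pvS M a)) l = _
    rw [ih]
    have hW : pvW M (a :: l) = pvC M (pvS M a) (pvW M l) := by
      show List.foldl _ (pvC M (pvE M) (pvS M a)) l = _
      rw [ih, pvC_e_left]
    rw [hW, pvC_assoc]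

theorem pvW_append (M : ℕ) [NeZero M] (xs ys : List Int) :
    pvW M (xs ++ ys) = pvC M (pvW M xs) (pvW M ys) := by
  show List.foldl _ _ (xs ++ ys) = _
  rw [List.foldl_append]
  exact pvFold_from M ys _

theorem pvW_singleton (M : ℕ) [NeZero M] (a : Int) : pvW M [a] = pvS M a := by
  show pvC M (pvE M) (pvS M a) = pvS M a
  exact pvC_e_left M _

-- cutting everything always works: cell 0 never becomes unreachable
theorem pvW_zero_ne_top (M : ℕ) [NeZero M] (T : List Int) : pvW M T 0 ≠ ⊤ := by
  have main : ∀ (l : List Int) (acc : ZMod M → WithTop Int), acc 0 ≠ ⊤ →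
      (l.foldl (fun acc a => pvC M acc (pvS M a)) acc) 0 ≠ ⊤ := by
    intro l
    induction l with
    | nil => intro acc h; exact h
    | cons a l ih =>
      intro acc h
      apply ih
      have hle : (pvC M acc (pvS M a)) 0 ≤ acc 0 + pvS M a 0 := by
        calc (pvC M acc (pvS M a)) 0 ≤ acc 0 + pvS M a (0 - 0) :=
              Finset.inf_le (Finset.mem_univ _)
          _ = acc 0 + pvS M a 0 := by rw [sub_zero]
      have hs : pvS M a 0 ≠ ⊤ := by
        unfold pvS
        by_cases h0 : (0 : ZMod M) = (a : ZMod M) <;> simp [h0]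
      exact ne_top_of_le_ne_top (WithTop.add_ne_top.mpr ⟨h, hs⟩) hle
  exact main T (pvE M) (by simp [pvE])

-- ---------- bridging the ports to the algebra ----------

theorem pvVal_cast (M : ℕ) [NeZero M] (t : ZMod M) : ((t.val : ℕ) : ZMod M) = t := by
  simp [ZMod.natCast_val, ZMod.cast_id]

theorem pvVal_sub (m : Int) (hm : 1 ≤ m) [NeZero m.toNat] (t : ZMod m.toNat) (a : Int) :
    (((t.val : Int) - a) % m).toNat = (t - (a : ZMod m.toNat)).val := by
  have hMm : ((m.toNat : ℕ) : Int) = m := Int.toNat_of_nonneg (by omega)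
  have h := ZMod.val_intCast (n := m.toNat) ((t.val : Int) - a)
  have hcast : ((((t.val : Int) - a) : Int) : ZMod m.toNat) = t - (a : ZMod m.toNat) := by
    push_cast
    simp [ZMod.natCast_val, ZMod.cast_id]
  rw [hcast, hMm] at h
  omega

-- the value of an array cell, seen as a cost indexed by a residue
def pvAbs (M : ℕ) (v : Array (Option Int)) : ZMod M → WithTop Int :=
  fun t => pvF (v.getD t.val none)

theorem pvAbs_step (m : Int) (hm : 1 ≤ m) [NeZero m.toNat] (row : Array (Option Int)) (a : Int) :
    pvAbs m.toNat (orchardStep m row a) = pvC m.toNat (pvAbs m.toNat row) (pvS m.toNat a) := by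
  funext t
  have htv : t.val < m.toNat := ZMod.val_lt t
  have h2p := pvInf_two_point m.toNat (pvAbs m.toNat row) t ((a : ZMod m.toNat)) 0 1
    (by norm_num)
  show pvF ((orchardStep m row a).getD t.val none) = _
  rw [orchardStep_getD m hm row a t.val htv, pvF_min, pvF_map_succ, pvVal_sub m hm t a]
  simp only [pvC, pvS]
  rw [h2p, add_zero]
  rfl

theorem pvAbs_foldA (m : Int) (hm : 1 ≤ m) [NeZero m.toNat] (T : List Int) :
    ∀ (row : Array (Option Int)),
      pvAbs m.toNat (T.foldl (orchardStep m) row)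
        = T.foldl (fun acc a => pvC m.toNat acc (pvS m.toNat a)) (pvAbs m.toNat row) := by
  induction T with
  | nil => intro row; rfl
  | cons a T ih =>
    intro row
    show pvAbs m.toNat (T.foldl (orchardStep m) (orchardStep m row a)) = _
    rw [ih, pvAbs_step m hm]
    rfl

theorem pvAbs_row0 (m : Int) (hm : 1 ≤ m) [NeZero m.toNat] :
    pvAbs m.toNat ((Array.replicate m.toNat (none : Option Int)).setIfInBounds 0 (some 0))
      = pvE m.toNat := by
  funext t
  have htv : t.val < m.toNat := ZMod.val_lt t
  unfold pvAbs
  rw [pvGetD_set _ _ _ _ (by simpa using htv)]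
  have hrep : (Array.replicate m.toNat (none : Option Int)).getD t.val none = none := by
    rw [pvAGetD]; simp [htv]
  unfold pvE
  by_cases h : t = 0
  · rw [if_pos (by rw [h, ZMod.val_zero]), if_pos h]; rfl
  · rw [if_neg (fun hc => h (ZMod.val_injective _ (by rw [← hc, ZMod.val_zero]))), hrep, if_neg h]; rfl

-- ---------- more tools: point/filter infima, scatter folds, commutativity ----------

theorem pvInf_point (M : ℕ) [NeZero M] (g : ZMod M → WithTop Int) (c : ZMod M) :
    (Finset.univ.inf fun k => if k = c then g k else ⊤) = g c := by
  apply le_antisymm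
  · calc (Finset.univ.inf fun k => if k = c then g k else ⊤)
        ≤ if c = c then g c else ⊤ := Finset.inf_le (Finset.mem_univ _)
      _ = g c := by rw [if_pos rfl]
  · apply Finset.le_inf
    intro k _
    by_cases hk : k = c
    · subst hk; rw [if_pos rfl]
    · rw [if_neg hk]; exact le_top

theorem pvInf_filter_extend {ι : Type} (s : Finset ι) (p : ι → Prop) [DecidablePred p]
    (f : ι → WithTop Int) (h : ∀ i ∈ s, ¬ p i → f i = ⊤) :
    (s.filter p).inf f = s.inf f := by
  apply le_antisymm
  · apply Finset.le_inf
    intro i hi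
    by_cases hp : p i
    · exact Finset.inf_le (Finset.mem_filter.mpr ⟨hi, hp⟩)
    · rw [h i hi hp]; exact le_top
  · apply Finset.le_inf
    intro i hi
    exact Finset.inf_le (Finset.mem_filter.mp hi).1

theorem pvF_foldl_toFinset (l : List ℕ) (g : ℕ → Option Int) (acc : Option Int) :
    pvF (l.foldl (fun s j => pvOmin s (g j)) acc)
      = pvF acc ⊓ l.toFinset.inf (fun j => pvF (g j)) := by
  induction l generalizing acc with
  | nil => simp
  | cons a l ih =>
    show pvF (l.foldl (fun s j => pvOmin s (g j)) (pvOmin acc (g a))) = _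
    rw [ih, pvF_min, List.toFinset_cons, Finset.inf_insert, pvInf_min, pvInf_min, pvInf_min]
    rw [min_assoc]

-- a fold of cellwise relaxations, cell by cell
theorem pvFoldl_relax {α : Type} (step : Array (Option Int) → α → Array (Option Int))
    (contrib : α → ℕ → Option Int)
    (hsize : ∀ out i, (step out i).size = out.size)
    (hcell : ∀ out (t : ℕ), t < out.size → ∀ i,
      (step out i).getD t none = pvOmin (out.getD t none) (contrib i t)) :
    ∀ (l : List α) (out : Array (Option Int)) (t : ℕ), t < out.size →
      (l.foldl step out).getD t none
        = pvOmin (out.getD t none) (l.foldl (fun s i => pvOmin s (contrib i t)) none) := by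
  intro l
  induction l with
  | nil => intro out t ht; simp [List.foldl, pvOmin_none_right]
  | cons a l ih =>
    intro out t ht
    show (l.foldl step (step out a)).getD t none = _
    rw [ih (step out a) t (by rw [hsize]; exact ht), hcell out t ht a]
    conv_rhs => rw [show (a :: l) = [a] ++ l from rfl, List.foldl_append]
    show _ = pvOmin (out.getD t none)
      (l.foldl (fun s i => pvOmin s (contrib i t)) (pvOmin none (contrib a t)))
    rw [foldl_pvOmin_hoist _ l (pvOmin none (contrib a t)), pvOmin_none_left, pvOmin_assoc]

theorem pvFoldl_relax_size {α : Type} (step : Array (Option Int) → α → Array (Option Int))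
    (hsize : ∀ out i, (step out i).size = out.size) (l : List α) (out : Array (Option Int)) :
    (l.foldl step out).size = out.size := by
  induction l generalizing out with
  | nil => rfl
  | cons a l ih => rw [List.foldl_cons, ih, hsize]

theorem pvToNat_emod (m : Int) (hm : 1 ≤ m) [NeZero m.toNat] (x : Int) :
    (x % m).toNat = ((x : ZMod m.toNat)).val := by
  have hMm : ((m.toNat : ℕ) : Int) = m := Int.toNat_of_nonneg (by omega)
  have h := ZMod.val_intCast (n := m.toNat) x
  rw [hMm] at h
  omega

theorem pvS_mod (m : Int) (hm : 1 ≤ m) [NeZero m.toNat] (a : Int) :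
    pvS m.toNat (PySem.Int.mod a m) = pvS m.toNat a := by
  have hMm : ((m.toNat : ℕ) : Int) = m := Int.toNat_of_nonneg (by omega)
  unfold pvS
  rw [PySem.Int.mod_eq_emod_of_pos (by omega), show a % m = a % ((m.toNat : ℕ) : Int) by rw [hMm],
    ZMod.intCast_mod]

theorem pvC_pvS (M : ℕ) [NeZero M] (x : ZMod M → WithTop Int) (a : Int) (t : ZMod M) :
    pvC M x (pvS M a) t = min (x (t - (a : ZMod M))) (x t + 1) := by
  have h2p := pvInf_two_point M x t ((a : ZMod M)) 0 1 (by norm_num)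
  simp only [pvC, pvS]
  rw [h2p, add_zero]

theorem pvC_comm (M : ℕ) [NeZero M] (x y : ZMod M → WithTop Int) : pvC M x y = pvC M y x := by
  funext t
  show (Finset.univ.inf fun j => x j + y (t - j)) = Finset.univ.inf fun j => y j + x (t - j)
  calc (Finset.univ.inf fun j => x j + y (t - j))
      = Finset.univ.inf fun i => x ((Equiv.subLeft t) i) + y (t - (Equiv.subLeft t) i) :=
        (pvInf_equiv (Equiv.subLeft t) _).symm
    _ = Finset.univ.inf fun i => y i + x (t - i) := by
        apply Finset.inf_congr rfl
        intro i _
        have h1 : (Equiv.subLeft t) i = t - i := rfl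
        have h2 : t - (t - i) = i := by ring
        rw [h1, h2, add_comm]

theorem pvFoldl_perm {α β : Type} (f : β → α → β)
    (h : ∀ b a1 a2, f (f b a1) a2 = f (f b a2) a1) {l1 l2 : List α} (p : l1.Perm l2) :
    ∀ (b : β), l1.foldl f b = l2.foldl f b := by
  induction p with
  | nil => intro b; rfl
  | cons x _ ih => intro b; simp only [List.foldl_cons]; exact ih _
  | swap x y l => intro b; simp only [List.foldl_cons]; rw [h]
  | trans _ _ ih1 ih2 => intro b; rw [ih1, ih2]

theorem pvFoldC_from {α : Type} (M : ℕ) [NeZero M] (h : α → ZMod M → WithTop Int)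
    (l : List α) (acc : ZMod M → WithTop Int) :
    l.foldl (fun acc i => pvC M acc (h i)) acc
      = pvC M acc (l.foldl (fun acc i => pvC M acc (h i)) (pvE M)) := by
  induction l generalizing acc with
  | nil => simp [List.foldl, pvC_e_right]
  | cons a l ih =>
    show List.foldl _ (pvC M acc (h a)) l = _
    rw [ih]
    conv_rhs => rw [show List.foldl (fun acc i => pvC M acc (h i)) (pvE M) (a :: l)
      = List.foldl (fun acc i => pvC M acc (h i)) (pvC M (pvE M) (h a)) l from rfl, ih]
    rw [pvC_e_left, pvC_assoc]

-- ---------- one residue group: characterising "cut j of c trees of residue ρ" ----------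

def pvPhi (M : ℕ) [NeZero M] (ρ : ZMod M) (c : ℕ) : ZMod M → WithTop Int :=
  fun t => (Finset.range (c + 1)).inf
    fun j => if ((c : ZMod M) - (j : ZMod M)) * ρ = t then (((j : ℕ) : Int) : WithTop Int) else ⊤

theorem pvPhi_succ (M : ℕ) [NeZero M] (ρ : ZMod M) (c : ℕ) (t : ZMod M) :
    pvPhi M ρ (c + 1) t = min (pvPhi M ρ c (t - ρ)) (pvPhi M ρ c t + 1) := by
  have hsplit : Finset.range (c + 2)
      = Finset.range (c + 1) ∪ (Finset.range (c + 1)).image Nat.succ := by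
    ext x
    simp only [Finset.mem_union, Finset.mem_image, Finset.mem_range]
    constructor
    · intro hx
      by_cases h : x < c + 1
      · exact Or.inl h
      · exact Or.inr ⟨x - 1, by omega, by omega⟩
    · rintro (h | ⟨y, hy, rfl⟩) <;> omega
  show (Finset.range (c + 2)).inf _ = _
  rw [hsplit, Finset.inf_union, pvInf_min]
  congr 1
  · -- keep the new tree: indices 0..c, target shifts by ρ
    apply Finset.inf_congr rfl
    intro j _
    have key : (((c + 1 : ℕ) : ZMod M) - (j : ZMod M)) * ρ
        = ((c : ZMod M) - (j : ZMod M)) * ρ + ρ := by push_cast; ring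
    have hcond : (((c + 1 : ℕ) : ZMod M) - (j : ZMod M)) * ρ = t
        ↔ ((c : ZMod M) - (j : ZMod M)) * ρ = t - ρ := by
      rw [key]
      exact ⟨fun h => by rw [eq_sub_iff_add_eq]; exact h,
             fun h => by rw [eq_sub_iff_add_eq] at h; exact h⟩
    exact if_congr hcond rfl rfl
  · -- cut the new tree: indices 1..c+1, one more cut
    rw [Finset.inf_image]
    show _ = pvPhi M ρ c t + 1
    unfold pvPhi
    rw [pvInf_add_right]
    apply Finset.inf_congr rfl
    intro j _
    simp only [Function.comp]
    have key : (((c + 1 : ℕ) : ZMod M) - ((Nat.succ j : ℕ) : ZMod M))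
        = ((c : ZMod M) - (j : ZMod M)) := by push_cast; ring
    by_cases hP : ((c : ZMod M) - (j : ZMod M)) * ρ = t
    · rw [if_pos (by rw [key]; exact hP), if_pos hP]
      have : (((Nat.succ j : ℕ) : Int) : WithTop Int) = (((j : ℕ) : Int) : WithTop Int) + 1 := by
        push_cast
        rfl
      rw [this]
    · rw [if_neg (fun hc => hP (by rw [key] at hc; exact hc)), if_neg hP, top_add]

theorem pvPhi_eq_pvW (M : ℕ) [NeZero M] (a : Int) (c : ℕ) :
    pvPhi M ((a : ZMod M)) c = pvW M (List.replicate c a) := by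
  induction c with
  | zero =>
    funext t
    show (Finset.range 1).inf _ = pvE M t
    rw [Finset.range_one, Finset.inf_singleton]
    unfold pvE
    by_cases h : t = 0
    · rw [if_pos (by rw [h]; push_cast; ring), if_pos h]; rfl
    · rw [if_neg (fun hc => h (by rw [← hc]; push_cast; ring)), if_neg h]
  | succ c ih =>
    rw [List.replicate_succ', pvW_append, pvW_singleton, ← ih]
    funext t
    rw [pvC_pvS, pvPhi_succ]

-- the cap: an optimal cut count within one residue group never reaches the
-- additive order of the residue, hence never exceeds M - 1
theorem pvPhi_cap (M : ℕ) [NeZero M] (ρ : ZMod M) (c : ℕ) (t : ZMod M) :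
    (Finset.range (min c (M - 1) + 1)).inf
      (fun j => if ((c : ZMod M) - (j : ZMod M)) * ρ = t
        then (((j : ℕ) : Int) : WithTop Int) else ⊤)
      = pvPhi M ρ c t := by
  apply le_antisymm
  · apply Finset.le_inf
    intro j hj
    rw [Finset.mem_range] at hj
    by_cases hP : ((c : ZMod M) - (j : ZMod M)) * ρ = t
    · set p := addOrderOf ρ with hpdef
      have hp0 : 0 < p := addOrderOf_pos ρ
      have hpM : p ≤ M := by
        have h := addOrderOf_le_card_univ (x := ρ)
        simpa [ZMod.card] using h
      have hdm := Nat.div_add_mod j p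
      have hj' : j % p ≤ j := Nat.mod_le j p
      have hjp : j % p < p := Nat.mod_lt j hp0
      have hM0 : 0 < M := Nat.pos_of_ne_zero (NeZero.ne M)
      have hmem : j % p ∈ Finset.range (min c (M - 1) + 1) := by
        rw [Finset.mem_range]
        omega
      have hzero : (((j - j % p : ℕ) : ZMod M)) * ρ = 0 := by
        have hsub : j - j % p = p * (j / p) := by omega
        rw [hsub]
        push_cast
        rw [mul_assoc, mul_comm ((j / p : ℕ) : ZMod M) ρ, ← mul_assoc,
          show ((p : ℕ) : ZMod M) * ρ = p • ρ from (nsmul_eq_mul p ρ).symm,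
          hpdef, addOrderOf_nsmul_eq_zero, zero_mul]
      have hP' : ((c : ZMod M) - ((j % p : ℕ) : ZMod M)) * ρ = t := by
        have hexp : ((c : ZMod M) - ((j % p : ℕ) : ZMod M)) * ρ
            = ((c : ZMod M) - (j : ZMod M)) * ρ + (((j - j % p : ℕ) : ZMod M)) * ρ := by
          rw [Nat.cast_sub hj']
          ring
        rw [hexp, hzero, add_zero, hP]
      calc (Finset.range (min c (M - 1) + 1)).inf _
          ≤ if ((c : ZMod M) - ((j % p : ℕ) : ZMod M)) * ρ = t
              then (((j % p : ℕ) : Int) : WithTop Int) else ⊤ := Finset.inf_le hmem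
        _ = (((j % p : ℕ) : Int) : WithTop Int) := by rw [if_pos hP']
        _ ≤ (((j : ℕ) : Int) : WithTop Int) := by
            rw [WithTop.coe_le_coe]
            exact_mod_cast hj'
        _ = if ((c : ZMod M) - (j : ZMod M)) * ρ = t
              then (((j : ℕ) : Int) : WithTop Int) else ⊤ := by rw [if_pos hP]
    · rw [if_neg hP]; exact le_top
  · apply Finset.le_inf
    intro j hj
    rw [Finset.mem_range] at hj
    exact Finset.inf_le (Finset.mem_range.mpr (by omega))

-- ---------- the pvGroup fold: ascending write-if-None keeps the first (minimal) index ----------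

theorem pvWriteFirst (idx : ℕ → ℕ) (val : ℕ → Int) :
    ∀ (js : List ℕ) (g : Array (Option Int)) (t : ℕ), t < g.size →
      ((js.foldl (fun g j => if g.getD (idx j) none = none
          then g.setIfInBounds (idx j) (some (val j)) else g) g).getD t none)
        = (match g.getD t none with
           | some v => some v
           | none => ((js.find? (fun j => idx j == t)).map val)) := by
  intro js
  induction js with
  | nil =>
    intro g t _
    cases hg : g.getD t none <;> simp [hg, List.find?]
  | cons j js ih =>
    intro g t ht
    by_cases hc : g.getD (idx j) none = none
    · have hstep : (if g.getD (idx j) none = none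
          then g.setIfInBounds (idx j) (some (val j)) else g)
          = g.setIfInBounds (idx j) (some (val j)) := if_pos hc
      show ((js.foldl _ (if g.getD (idx j) none = none
          then g.setIfInBounds (idx j) (some (val j)) else g)).getD t none) = _
      rw [hstep, ih _ t (by simpa using ht), pvGetD_set g (idx j) t _ ht]
      by_cases hjt : idx j = t
      · rw [if_pos hjt]
        have hgt : g.getD t none = none := by rw [← hjt]; exact hc
        rw [hgt]
        have hpred : (fun j => idx j == t) j = true := by simpa using hjt
        rw [List.find?_cons_of_pos (by simpa using hjt)]
        rfl
      · rw [if_neg hjt]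
        have hpred : (fun j => idx j == t) j = false := by simpa using hjt
        rw [List.find?_cons_of_neg (by simpa using hjt)]
    · have hstep : (if g.getD (idx j) none = none
          then g.setIfInBounds (idx j) (some (val j)) else g) = g := if_neg hc
      show ((js.foldl _ (if g.getD (idx j) none = none
          then g.setIfInBounds (idx j) (some (val j)) else g)).getD t none) = _
      rw [hstep, ih g t ht]
      cases hg : g.getD t none with
      | some v => rfl
      | none =>
        have hpred : (idx j == t) = false := by
          rw [beq_eq_false_iff_ne]
          intro he
          rw [he] at hc
          exact hc hg
        rw [List.find?_cons_of_neg (by simpa using hpred)]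

theorem pvWriteFirst0 (idx : ℕ → ℕ) (val : ℕ → Int) (js : List ℕ) (g : Array (Option Int))
    (t : ℕ) (ht : t < g.size) (hg : g.getD t none = none) :
    ((js.foldl (fun g j => if g.getD (idx j) none = none
        then g.setIfInBounds (idx j) (some (val j)) else g) g).getD t none)
      = ((js.find? (fun j => idx j == t)).map val) := by
  rw [pvWriteFirst idx val js g t ht, hg]

theorem pvF_find_range (n : ℕ) (p : ℕ → Bool) :
    pvF (((List.range n).find? p).map (fun (j : ℕ) => ((j : ℕ) : Int)))
      = (Finset.range n).inf
          (fun j => if p j then (((j : ℕ) : Int) : WithTop Int) else ⊤) := by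
  induction n with
  | zero => simp [pvF]
  | succ n ih =>
    rw [List.range_succ, Finset.range_add_one, Finset.inf_insert, pvInf_min]
    cases hf : (List.range n).find? p with
    | none =>
      rw [hf] at ih
      have happ : (List.range n ++ [n]).find? p = [n].find? p := by
        rw [List.find?_append, hf]
        rfl
      rw [happ, ← ih]
      cases hp : p n with
      | true => simp [List.find?, hp, pvF]
      | false => simp [List.find?, hp, pvF]
    | some j0 =>
      have hj0 : j0 < n := List.mem_range.mp (List.mem_of_find?_eq_some hf)
      rw [hf] at ih
      have happ : (List.range n ++ [n]).find? p = some j0 := by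
        rw [List.find?_append, hf]
        rfl
      rw [happ, ← ih]
      have hle : pvF ((some j0).map (fun (j : ℕ) => ((j : ℕ) : Int)))
          ≤ if p n then (((n : ℕ) : Int) : WithTop Int) else ⊤ := by
        cases hp : p n
        · exact le_top
        · show (((j0 : ℕ) : Int) : WithTop Int) ≤ _
          rw [if_pos rfl, WithTop.coe_le_coe]
          exact_mod_cast Nat.le_of_lt hj0
      rw [min_eq_right hle]

theorem pvAbs_group (m : Int) (hm : 1 ≤ m) [NeZero m.toNat] (r c : Int) (hc : 0 ≤ c) :
    pvAbs m.toNat (pvGroup r c m) = pvW m.toNat (List.replicate c.toNat r) := by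
  rw [← pvPhi_eq_pvW]
  funext t
  have htv : t.val < m.toNat := ZMod.val_lt t
  have hM0 : 0 < m.toNat := by omega
  have hrep : (Array.replicate m.toNat (none : Option Int)).getD t.val none = none := by
    rw [pvAGetD]; simp [htv]
  have hcell : (pvGroup r c m).getD t.val none
      = (((List.range ((min c (m - 1)) + 1).toNat).find?
          (fun j => (PySem.Int.mod ((c - ((j : ℕ) : Int)) * r) m).toNat == t.val)).map
            (fun j => ((j : ℕ) : Int))) := by
    unfold pvGroup
    exact pvWriteFirst0 (fun j => (PySem.Int.mod ((c - ((j : ℕ) : Int)) * r) m).toNat)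
      (fun j => ((j : ℕ) : Int)) _ _ t.val (by simpa using htv) hrep
  show pvF ((pvGroup r c m).getD t.val none) = _
  rw [hcell]
  have hK : ((min c (m - 1)) + 1).toNat = min c.toNat (m.toNat - 1) + 1 := by omega
  rw [hK, pvF_find_range, ← pvPhi_cap]
  apply Finset.inf_congr rfl
  intro j _
  have hcond : ((PySem.Int.mod ((c - ((j : ℕ) : Int)) * r) m).toNat == t.val) = true
      ↔ ((c.toNat : ZMod m.toNat) - (j : ZMod m.toNat)) * ((r : Int) : ZMod m.toNat) = t := by
    rw [beq_iff_eq, PySem.Int.mod_eq_emod_of_pos (by omega), pvToNat_emod m hm]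
    have hcc : ((c.toNat : ℕ) : ZMod m.toNat) = ((c : Int) : ZMod m.toNat) := by
      rw [← Int.cast_natCast, Int.toNat_of_nonneg hc]
    constructor
    · intro h
      have he := ZMod.val_injective _ h
      rw [← he, hcc]
      push_cast
      ring
    · intro h
      have he : (((c - ((j : ℕ) : Int)) * r : Int) : ZMod m.toNat) = t := by
        rw [← h, hcc]
        push_cast
        ring
      rw [he]
  exact if_congr hcond rfl rfl

-- ---------- the support-sparse convolution, cell by cell ----------

theorem pvConvUpd_getD (x y : Array (Option Int)) (m : Int) (out : Array (Option Int))
    (j k t : Nat) (ht : t < out.size) :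
    (pvConvUpd x y m out j k).getD t none
      = pvOmin (out.getD t none)
          (if (PySem.Int.mod ((j : Int) + (k : Int)) m).toNat = t
            then pvOAdd (x.getD j none) (y.getD k none) else none) := by
  unfold pvConvUpd
  cases hx : x.getD j none with
  | none => simp [pvOAdd, pvOmin_none_right]
  | some xv =>
    cases hy : y.getD k none with
    | none => simp [pvOAdd, pvOmin_none_right]
    | some yv =>
      show (out.setIfInBounds (PySem.Int.mod ((j : Int) + (k : Int)) m).toNat
        (pvOmin (out.getD (PySem.Int.mod ((j : Int) + (k : Int)) m).toNat none)
          (some (xv + yv)))).getD t none = _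
      rw [pvGetD_set _ _ _ _ ht]
      by_cases hidx : (PySem.Int.mod ((j : Int) + (k : Int)) m).toNat = t
      · rw [if_pos hidx, if_pos hidx, hidx]
        rfl
      · rw [if_neg hidx, if_neg hidx, pvOmin_none_right]

theorem pvConvUpd_size (x y : Array (Option Int)) (m : Int) (out : Array (Option Int))
    (j k : Nat) : (pvConvUpd x y m out j k).size = out.size := by
  unfold pvConvUpd
  cases x.getD j none <;> cases y.getD k none <;> simp

theorem pvInf_const_top (s : Finset ℕ) (f : ℕ → WithTop Int) (h : ∀ i ∈ s, f i = ⊤) :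
    s.inf f = ⊤ := by
  apply le_antisymm le_top
  apply Finset.le_inf
  intro i hi
  rw [h i hi]

theorem pvAbs_conv (m : Int) (hm : 1 ≤ m) [NeZero m.toNat] (x y : Array (Option Int)) :
    pvAbs m.toNat (pvConv x y m) = pvC m.toNat (pvAbs m.toNat x) (pvAbs m.toNat y) := by
  funext t
  have htv : t.val < m.toNat := ZMod.val_lt t
  have hrep : (Array.replicate m.toNat (none : Option Int)).getD t.val none = none := by
    rw [pvAGetD]; simp [htv]
  -- the two nested scatter folds, cell by cell
  have hinner : ∀ (out : Array (Option Int)) (u : ℕ), u < out.size → ∀ j : ℕ,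
      (((List.range m.toNat).filter (fun k => !(y.getD k none == none))).foldl
        (fun out k => pvConvUpd x y m out j k) out).getD u none
      = pvOmin (out.getD u none)
          (((List.range m.toNat).filter (fun k => !(y.getD k none == none))).foldl
            (fun s (k : ℕ) => pvOmin s (if (PySem.Int.mod ((j : Int) + (k : Int)) m).toNat = u
              then pvOAdd (x.getD j none) (y.getD k none) else none)) none) := by
    intro out u hu j
    exact pvFoldl_relax _ _ (fun out k => pvConvUpd_size x y m out j k)
      (fun out u hu k => pvConvUpd_getD x y m out j k u hu) _ out u hu
  have hcell : (pvConv x y m).getD t.val none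
      = ((List.range m.toNat).filter (fun j => !(x.getD j none == none))).foldl
          (fun s (j : ℕ) => pvOmin s
            (((List.range m.toNat).filter (fun k => !(y.getD k none == none))).foldl
              (fun s (k : ℕ) => pvOmin s (if (PySem.Int.mod ((j : Int) + (k : Int)) m).toNat = t.val
                then pvOAdd (x.getD j none) (y.getD k none) else none)) none)) none := by
    unfold pvConv
    rw [pvFoldl_relax _ _
      (fun out j => pvFoldl_relax_size _ (fun out k => pvConvUpd_size x y m out j k) _ out)
      (fun out u hu j => hinner out u hu j) _ _ t.val (by simpa using htv), hrep,
      pvOmin_none_left]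
  show pvF ((pvConv x y m).getD t.val none) = _
  rw [hcell, pvF_foldl_toFinset]
  have htop : pvF (none : Option Int) = ⊤ := rfl
  rw [htop, top_inf_eq]
  -- name the pair term
  have hterm : ∀ j k : ℕ,
      pvF (if (PySem.Int.mod ((j : Int) + (k : Int)) m).toNat = t.val
        then pvOAdd (x.getD j none) (y.getD k none) else none)
      = (if (PySem.Int.mod ((j : Int) + (k : Int)) m).toNat = t.val
          then pvF (x.getD j none) + pvF (y.getD k none) else ⊤) := by
    intro j k
    split_ifs
    · exact pvF_add _ _
    · rfl
  -- extend the inner support inf to the whole range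
  have hinner2 : ∀ j : ℕ,
      pvF (((List.range m.toNat).filter (fun k => !(y.getD k none == none))).foldl
        (fun s (k : ℕ) => pvOmin s (if (PySem.Int.mod ((j : Int) + (k : Int)) m).toNat = t.val
          then pvOAdd (x.getD j none) (y.getD k none) else none)) none)
      = (Finset.range m.toNat).inf
          (fun (k : ℕ) => if (PySem.Int.mod ((j : Int) + (k : Int)) m).toNat = t.val
            then pvF (x.getD j none) + pvF (y.getD k none) else ⊤) := by
    intro j
    rw [pvF_foldl_toFinset, htop, top_inf_eq, List.toFinset_filter, List.toFinset_range]
    rw [pvInf_filter_extend _ _ _ (by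
      intro k _ hk
      have hk2 : y.getD k none = none := by simpa using hk
      rw [hterm, hk2]
      split_ifs
      · show pvF (x.getD j none) + pvF (none : Option Int) = ⊤
        rw [htop, add_top]
      · rfl)]
    apply Finset.inf_congr rfl
    intro k _
    exact hterm j k
  -- rewrite all inner values, extend the outer inf
  have hout : (((List.range m.toNat).filter (fun j => !(x.getD j none == none))).toFinset).inf
      (fun (j : ℕ) => pvF (((List.range m.toNat).filter (fun k => !(y.getD k none == none))).foldl
        (fun s (k : ℕ) => pvOmin s (if (PySem.Int.mod ((j : Int) + (k : Int)) m).toNat = t.val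
          then pvOAdd (x.getD j none) (y.getD k none) else none)) none))
      = (Finset.range m.toNat).inf (fun (j : ℕ) => (Finset.range m.toNat).inf
          (fun (k : ℕ) => if (PySem.Int.mod ((j : Int) + (k : Int)) m).toNat = t.val
            then pvF (x.getD j none) + pvF (y.getD k none) else ⊤)) := by
    rw [List.toFinset_filter, List.toFinset_range]
    rw [pvInf_filter_extend _ _ _ (by
      intro j _ hj
      have hj2 : x.getD j none = none := by simpa using hj
      rw [hinner2]
      apply pvInf_const_top
      intro k _
      rw [hj2]
      split_ifs
      · show pvF (none : Option Int) + pvF (y.getD k none) = ⊤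
        rw [htop, top_add]
      · rfl)]
    apply Finset.inf_congr rfl
    intro j _
    exact hinner2 j
  rw [hout]
  -- pass to ZMod indices and collapse the inner inf to one point
  rw [← pvInf_range_val m.toNat]
  show _ = (pvC m.toNat (pvAbs m.toNat x) (pvAbs m.toNat y)) t
  simp only [pvC]
  apply Finset.inf_congr rfl
  intro j _
  rw [← pvInf_range_val m.toNat]
  have hcond : ∀ k : ZMod m.toNat,
      ((PySem.Int.mod ((j.val : Int) + (k.val : Int)) m).toNat = t.val) ↔ (k = t - j) := by
    intro k
    rw [PySem.Int.mod_eq_emod_of_pos (by omega), pvToNat_emod m hm]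
    have hc2 : ((((j.val : ℕ) : Int) + ((k.val : ℕ) : Int) : Int) : ZMod m.toNat) = j + k := by
      push_cast
      rw [pvVal_cast, pvVal_cast]
    constructor
    · intro h
      have := ZMod.val_injective _ h
      rw [hc2] at this
      rw [← this]
      ring
    · intro h
      rw [show ((((j.val : ℕ) : Int) + ((k.val : ℕ) : Int) : Int) : ZMod m.toNat).val = t.val by
        rw [hc2, h]; congr 1; ring]
  calc (Finset.univ : Finset (ZMod m.toNat)).inf
        (fun (k : ZMod m.toNat) => if (PySem.Int.mod ((j.val : Int) + (k.val : Int)) m).toNat = t.val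
          then pvF (x.getD j.val none) + pvF (y.getD k.val none) else ⊤)
      = Finset.univ.inf (fun k => if k = t - j
          then pvAbs m.toNat x j + pvAbs m.toNat y k else ⊤) := by
        apply Finset.inf_congr rfl
        intro k _
        exact if_congr (hcond k) rfl rfl
    _ = pvAbs m.toNat x j + pvAbs m.toNat y (t - j) :=
        pvInf_point m.toNat (fun k => pvAbs m.toNat x j + pvAbs m.toNat y k) (t - j)

-- ---------- regrouping: the counter's groups are a permutation of the residue list ----------

theorem pvCount_flatMap (ks : List Int) (cnt : Int → ℕ) (hnd : ks.Nodup) (v : Int) :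
    (ks.flatMap (fun k => List.replicate (cnt k) k)).count v
      = if v ∈ ks then cnt v else 0 := by
  induction ks with
  | nil => simp
  | cons k ks ih =>
    rcases List.nodup_cons.mp hnd with ⟨hk, hnd2⟩
    rw [List.flatMap_cons, List.count_append, ih hnd2]
    by_cases hv : v = k
    · subst hv
      simp [List.count_replicate, hk]
    · have h1 : List.count v (List.replicate (cnt k) k) = 0 := by
        simp only [List.count_replicate]
        rw [if_neg]
        intro h
        rw [beq_iff_eq] at h
        exact hv h.symm
      rw [h1]
      by_cases hv2 : v ∈ ks <;> simp [List.mem_cons, hv, hv2]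

theorem pvPerm_group (R : List Int) :
    R.Perm ((PySem.Set.ofList R).flatMap (fun k => List.replicate (R.count k) k)) := by
  apply List.perm_iff_count.mpr
  intro v
  rw [pvCount_flatMap _ _ (PySem.Set.nodup_ofList R) v]
  by_cases hv : v ∈ R
  · rw [if_pos ((PySem.Set.mem_ofList R v).mpr hv)]
  · rw [if_neg (fun h => hv ((PySem.Set.mem_ofList R v).mp h)), List.count_eq_zero.mpr hv]

theorem pvW_perm (M : ℕ) [NeZero M] {l1 l2 : List Int} (p : l1.Perm l2) :
    pvW M l1 = pvW M l2 := by
  unfold pvW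
  exact pvFoldl_perm _ (fun b a1 a2 => by
    show pvC M (pvC M b (pvS M a1)) (pvS M a2) = pvC M (pvC M b (pvS M a2)) (pvS M a1)
    rw [pvC_assoc, pvC_assoc, pvC_comm M (pvS M a1)]) p _

theorem pvW_map_mod (m : Int) (hm : 1 ≤ m) [NeZero m.toNat] (T : List Int) :
    pvW m.toNat (T.map (fun a => PySem.Int.mod a m)) = pvW m.toNat T := by
  unfold pvW
  rw [List.foldl_map]
  apply PySem.List.foldl_congr_mem
  intro acc a _
  rw [pvS_mod m hm]

theorem pvW_flat (M : ℕ) [NeZero M] (gs : List (Int × Int)) :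
    gs.foldl (fun acc rc => pvC M acc (pvW M (List.replicate rc.2.toNat rc.1))) (pvE M)
      = pvW M (gs.flatMap (fun rc => List.replicate rc.2.toNat rc.1)) := by
  induction gs with
  | nil => rfl
  | cons rc gs ih =>
    rw [List.flatMap_cons, pvW_append]
    show List.foldl _ (pvC M (pvE M) (pvW M (List.replicate rc.2.toNat rc.1))) gs = _
    rw [pvFoldC_from M (fun rc : Int × Int => pvW M (List.replicate rc.2.toNat rc.1)) gs, ih,
      pvC_e_left]

theorem pvAbs_foldB (m : Int) (hm : 1 ≤ m) [NeZero m.toNat] (gs : List (Int × Int)) :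
    ∀ best : Array (Option Int),
      pvAbs m.toNat (gs.foldl (fun best rc => pvConv best (pvGroup rc.1 rc.2 m) m) best)
        = gs.foldl (fun acc rc => pvC m.toNat acc (pvAbs m.toNat (pvGroup rc.1 rc.2 m)))
            (pvAbs m.toNat best) := by
  induction gs with
  | nil => intro best; rfl
  | cons rc gs ih =>
    intro best
    show pvAbs m.toNat (gs.foldl _ (pvConv best (pvGroup rc.1 rc.2 m) m)) = _
    rw [ih, pvAbs_conv m hm]
    rfl

-- B's whole pipeline equals the abstract per-tree fold
theorem pvAbs_orchardAlt (m : Int) (hm : 1 ≤ m) [NeZero m.toNat] (T : List Int) :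
    pvAbs m.toNat
      ((T.foldl (fun d a => d.modify (PySem.Int.mod a m) 0 (· + 1))
          (PySem.Dict.empty : PySem.Dict Int Int)).items.foldl
        (fun best rc => pvConv best (pvGroup rc.1 rc.2 m) m)
        ((Array.replicate m.toNat (none : Option Int)).setIfInBounds 0 (some 0)))
      = pvW m.toNat T := by
  rw [pvAbs_foldB m hm, pvAbs_row0 m hm]
  have hcounts : T.foldl (fun d a => d.modify (PySem.Int.mod a m) 0 (· + 1))
      (PySem.Dict.empty : PySem.Dict Int Int)
      = PySem.Dict.counter (T.map (fun a => PySem.Int.mod a m)) := by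
    rw [PySem.Dict.counter_eq_foldl, List.foldl_map]
  rw [hcounts, PySem.Dict.items_counter]
  set R := T.map (fun a => PySem.Int.mod a m) with hR
  have hcongr : (List.map (fun k => (k, ((List.count k R : ℕ) : Int))) (PySem.Set.ofList R)).foldl
        (fun acc rc => pvC m.toNat acc (pvAbs m.toNat (pvGroup rc.1 rc.2 m))) (pvE m.toNat)
      = (List.map (fun k => (k, ((List.count k R : ℕ) : Int))) (PySem.Set.ofList R)).foldl
        (fun acc rc => pvC m.toNat acc (pvW m.toNat (List.replicate rc.2.toNat rc.1)))
        (pvE m.toNat) := by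
    apply PySem.List.foldl_congr_mem
    intro acc rc hrc
    obtain ⟨k, -, rfl⟩ := List.mem_map.mp hrc
    rw [pvAbs_group m hm _ _ (Int.natCast_nonneg _)]
  rw [hcongr, pvW_flat]
  have hflat : (List.map (fun k => (k, ((List.count k R : ℕ) : Int))) (PySem.Set.ofList R)).flatMap
        (fun rc => List.replicate rc.2.toNat rc.1)
      = (PySem.Set.ofList R).flatMap (fun k => List.replicate (R.count k) k) := by
    rw [List.flatMap_map]
    simp only [Int.toNat_natCast]
  rw [hflat, ← pvW_perm m.toNat (pvPerm_group R), hR, pvW_map_mod m hm]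

theorem orchard_spec : Claim_equal_orchard := by
  intro T m _ hpre
  have hm : 1 ≤ m := hpre
  haveI : NeZero m.toNat := ⟨by omega⟩
  unfold Spec_orchard orchard orchard_alt
  by_cases hT : T = []
  · subst hT
    have h0 : ((Array.replicate m.toNat (none : Option Int)).setIfInBounds 0 (some 0)).getD 0 none
        = some 0 := by
      rw [pvGetD_set _ _ _ _ (by simp; omega)]
      simp
    simp [List.foldl, h0]
  · have hTne : T.isEmpty = false := by simp [hT]
    have hAb : pvAbs m.toNat
        (T.foldl (orchardStep m)
          ((Array.replicate m.toNat (none : Option Int)).setIfInBounds 0 (some 0)))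
        = pvW m.toNat T := by
      rw [pvAbs_foldA m hm, pvAbs_row0 m hm]
      rfl
    have hBb := pvAbs_orchardAlt m hm T
    have hne := pvW_zero_ne_top m.toNat T
    have h0A : pvF ((T.foldl (orchardStep m)
        ((Array.replicate m.toNat (none : Option Int)).setIfInBounds 0 (some 0))).getD 0 none)
        = pvW m.toNat T 0 := by
      have h := congrFun hAb (0 : ZMod m.toNat)
      simpa [pvAbs, ZMod.val_zero] using h
    have h0B : pvF (((T.foldl (fun d a => d.modify (PySem.Int.mod a m) 0 (· + 1))
          (PySem.Dict.empty : PySem.Dict Int Int)).items.foldl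
        (fun best rc => pvConv best (pvGroup rc.1 rc.2 m) m)
        ((Array.replicate m.toNat (none : Option Int)).setIfInBounds 0 (some 0))).getD 0 none)
        = pvW m.toNat T 0 := by
      have h := congrFun hBb (0 : ZMod m.toNat)
      simpa [pvAbs, ZMod.val_zero] using h
    cases hcA : (T.foldl (orchardStep m)
        ((Array.replicate m.toNat (none : Option Int)).setIfInBounds 0 (some 0))).getD 0 none with
    | none =>
      rw [hcA] at h0A
      exact absurd h0A.symm hne
    | some v =>
      cases hcB : ((T.foldl (fun d a => d.modify (PySem.Int.mod a m) 0 (· + 1))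
          (PySem.Dict.empty : PySem.Dict Int Int)).items.foldl
        (fun best rc => pvConv best (pvGroup rc.1 rc.2 m) m)
        ((Array.replicate m.toNat (none : Option Int)).setIfInBounds 0 (some 0))).getD 0 none with
      | none =>
        rw [hcB] at h0B
        exact absurd h0B.symm hne
      | some w =>
        rw [hcA] at h0A
        rw [hcB] at h0B
        have hvw : v = w := by
          have h := h0A.trans h0B.symm
          exact Option.some_injective _ (pvF_inj h)
        simp [hTne, hcA, hcB, hvw]
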